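-- pv_equiv track=rewrite | github.com/RichardTorresRivera/EDD_Consola | juegos/hanoi.py | crear_discos
-- ===== SOURCE A (Python) =====
-- def crear_discos(n):
--     """
--     Crea una representación visual de los discos para las Torres de Hanoi.
--
--     Args:
--         n (int): Número de discos.
--
--     Returns:
--         list: Representación de las torres con discos.
--     """
--     torre = [[]]
--     t = n
--     for i in range(2 * n + 3):
--         if i == (2 * n + 3) // 2:
--             torre[0].append("|")
--         else:
--             torre[0].append(" ")
--
--     for i in range(1, n + 1):
--         torre.append([])
--         for j in range(2 * n + 3):
--             if j < t - 1 or j > (2 * i + t + 1):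
--                 torre[i].append(" ")
--             elif j == t - 1:
--                 torre[i].append("[")
--             elif j == (2 * i + t + 1):
--                 torre[i].append("]")
--             else:
--                 torre[i].append("=")
--         t -= 1
--     return torre
-- ===== SOURCE B (Python) =====
-- def crear_discos(n):
--     """Build each row as one string from segment widths, then split into chars."""
--     filas = [' ' * (n + 1) + '|' + ' ' * (n + 1)]
--     for i in range(1, n + 1):
--         filas.append(' ' * (n - i) + '[' + '=' * (2 * i + 1) + ']' + ' ' * (n - i))
--     return [list(f) for f in filas]
-- ===== Notes on version B (the rewrite author's own statement) =====
-- stated objective: simpler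
-- what changed: B builds each row as one whole string from computed segment widths (spaces, bracket, '=' run) and splits it into characters, instead of A's per-cell scan over every column index with a chain of conditionals and a mutating width counter t.
-- outside the precondition, e.g. on crear_discos(-2): A returns [[]], B returns [['|']]
import Mathlib
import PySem

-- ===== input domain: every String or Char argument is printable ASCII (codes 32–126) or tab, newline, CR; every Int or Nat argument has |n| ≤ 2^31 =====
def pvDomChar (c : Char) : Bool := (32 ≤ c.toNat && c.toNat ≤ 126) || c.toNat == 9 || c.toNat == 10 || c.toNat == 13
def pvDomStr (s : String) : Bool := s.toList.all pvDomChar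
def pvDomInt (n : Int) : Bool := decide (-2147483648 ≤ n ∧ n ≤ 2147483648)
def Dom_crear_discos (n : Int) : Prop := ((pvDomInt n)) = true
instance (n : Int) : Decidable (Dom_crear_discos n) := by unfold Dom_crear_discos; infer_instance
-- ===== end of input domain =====

-- B builds each row from computed segment widths (whole-string concatenation) instead of
-- A's cell-by-cell scan with conditionals; objective: simpler.

-- ===== PORT A =====
-- literal transliteration of A: cell-by-cell loops with conditionals, state (torre, t)
def crear_discos (n : Int) : List (List String) :=
  let row0 := (PySem.List.pyRange 0 (2*n+3) 1).foldl
    (fun acc i => acc ++ [if i = PySem.Int.floordiv (2*n+3) 2 then "|" else " "]) []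
  let st := (PySem.List.pyRange 1 (n+1) 1).foldl
    (fun (st : List (List String) × Int) i =>
      let t := st.2
      let row := (PySem.List.pyRange 0 (2*n+3) 1).foldl
        (fun acc j =>
          acc ++ [if j < t - 1 ∨ 2*i + t + 1 < j then " "
                  else if j = t - 1 then "["
                  else if j = 2*i + t + 1 then "]"
                  else "="]) []
      (st.1 ++ [row], t - 1))
    ([row0], n)
  st.1

-- ===== PORT B =====
-- literal transliteration of Source B: rows as concatenations of repeated segments.
-- Python ' ' * k yields '' for k < 0; List.replicate k.toNat is exactly that.
def crear_discos_alt (n : Int) : List (List String) :=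
  let base := List.replicate (n+1).toNat " " ++ ["|"] ++ List.replicate (n+1).toNat " "
  let rows := (PySem.List.pyRange 1 (n+1) 1).map (fun i =>
    List.replicate (n - i).toNat " " ++ ["["] ++ List.replicate (2*i+1).toNat "="
      ++ ["]"] ++ List.replicate (n - i).toNat " ")
  base :: rows

-- ===== PRECONDITION & SPEC =====
-- Pre_ restricts to the natural domain of a disc count: for counts below -1 the computed row
-- width is nonpositive, so A returns a single empty row while B's whole-string formula still
-- prints the pole character.
def Pre_crear_discos (n : Int) : Prop := -1 ≤ n
instance (n : Int) : Decidable (Pre_crear_discos n) := by unfold Pre_crear_discos; infer_instance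
def pvWitness_crear_discos : Int := (2)

def Spec_crear_discos (n : Int) (out : List (List String)) : Prop := out = crear_discos_alt n
instance (n : Int) (out : List (List String)) : Decidable (Spec_crear_discos n out) := by unfold Spec_crear_discos; infer_instance

-- ===== CLAIM (what is proved, stated in full; the proofs are below) =====
def Claim_equal_crear_discos : Prop := ∀ (n : Int), Dom_crear_discos n → Pre_crear_discos n → Spec_crear_discos n (crear_discos n)

-- ===== LEMMAS AND PROOFS =====

-- proof-side names for A's inner loop (definitionally the lambdas in the port)
def rowCellA (i t j : Int) : String :=
  if j < t - 1 ∨ 2*i + t + 1 < j then " "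
  else if j = t - 1 then "["
  else if j = 2*i + t + 1 then "]"
  else "="

def rowA (n i t : Int) : List String :=
  (PySem.List.pyRange 0 (2*n+3) 1).foldl (fun acc j => acc ++ [rowCellA i t j]) []

-- a range of Ints is the cast of a Nat range shifted by the lower bound
lemma pyRange_eq_map_range (a b : Int) :
    PySem.List.pyRange a b 1 = (List.range (b - a).toNat).map (fun (k : Nat) => a + (k : Int)) := by
  by_cases h : a < b
  · simp only [PySem.List.pyRange, one_ne_zero, if_false, zero_lt_one, if_true, if_pos h,
      one_mul, add_sub_cancel_right, Int.ediv_one]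
  · have h0 : (b - a).toNat = 0 := by omega
    simp [PySem.List.pyRange, h, h0]

-- a range-map that is blank except for '[' at a, '=' strictly between a and b, ']' at b
lemma range_map_two_marks (a b N : Nat) (h1 : a < b) (h2 : b < N) (f : Nat → String)
    (hlt : ∀ j, j < a → f j = " ") (ha : f a = "[")
    (hmid : ∀ j, a < j → j < b → f j = "=") (hb : f b = "]")
    (hgt : ∀ j, b < j → j < N → f j = " ") :
    (List.range N).map f
      = List.replicate a " " ++ ["["] ++ List.replicate (b-a-1) "="
        ++ ["]"] ++ List.replicate (N-b-1) " " := by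
  apply List.ext_getElem
  · simp; omega
  · intro i hi hi'
    simp only [List.length_map, List.length_range] at hi
    simp only [List.getElem_map, List.getElem_range]
    simp only [List.getElem_append, List.getElem_replicate, List.length_append,
      List.length_replicate, List.length_cons, List.length_nil]
    simp only [List.getElem_singleton]
    split_ifs with c1 c2 c3 c4 <;>
      first
        | (exact hlt i (by omega))
        | (rw [show i = a by omega]; exact ha)
        | (exact hmid i (by omega) (by omega))
        | (rw [show i = b by omega]; exact hb)
        | (exact hgt i (by omega) (by omega))

-- the single-mark version for the base row
lemma range_map_one_mark (a N : Nat) (h : a < N) (f : Nat → String)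
    (hlt : ∀ j, j < a → f j = " ") (ha : f a = "|")
    (hgt : ∀ j, a < j → j < N → f j = " ") :
    (List.range N).map f = List.replicate a " " ++ ["|"] ++ List.replicate (N-a-1) " " := by
  apply List.ext_getElem
  · simp; omega
  · intro i hi hi'
    simp only [List.length_map, List.length_range] at hi
    simp only [List.getElem_map, List.getElem_range]
    simp only [List.getElem_append, List.getElem_replicate, List.length_append,
      List.length_replicate, List.length_cons, List.length_nil]
    simp only [List.getElem_singleton]
    split_ifs with c1 c2 <;>
      first
        | (exact hlt i (by omega))
        | (rw [show i = a by omega]; exact ha)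
        | (exact hgt i (by omega) (by omega))

-- A's disk row equals B's segment row when 1 ≤ i ≤ n and t = n + 1 - i
lemma rowA_eq (n i : Int) (h1 : 1 ≤ i) (h2 : i ≤ n) :
    rowA n i (n + 1 - i)
      = List.replicate (n - i).toNat " " ++ ["["] ++ List.replicate (2*i+1).toNat "="
        ++ ["]"] ++ List.replicate (n - i).toNat " " := by
  unfold rowA
  rw [PySem.List.foldl_append_singleton_eq_map, List.nil_append,
    pyRange_eq_map_range, List.map_map]
  have e := range_map_two_marks (n - i).toNat (n + i + 2).toNat (2*n + 3 - 0).toNat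
    (by omega) (by omega) (fun (k : Nat) => rowCellA i (n + 1 - i) (0 + (k : Int)))
    (by intro j hj; simp only [rowCellA]; split_ifs with c1 c2 c3 <;> first | rfl | omega)
    (by simp only [rowCellA]; split_ifs with c1 c2 c3 <;> first | rfl | omega)
    (by intro j hj1 hj2; simp only [rowCellA]; split_ifs with c1 c2 c3 <;> first | rfl | omega)
    (by simp only [rowCellA]; split_ifs with c1 c2 c3 <;> first | rfl | omega)
    (by intro j hj1 hj2; simp only [rowCellA]; split_ifs with c1 c2 c3 <;> first | rfl | omega)
  rw [show (n + i + 2).toNat - (n - i).toNat - 1 = (2*i+1).toNat by omega,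
      show (2*n + 3 - 0).toNat - (n + i + 2).toNat - 1 = (n - i).toNat by omega] at e
  exact e

-- outer loop: the fold with running t equals a map with t = n + 1 - i
lemma outer_fold (n : Int) (m : Nat) :
    ∀ (a : Int) (acc : List (List String)), n + 1 - a ≤ (m : Int) →
    ((PySem.List.pyRange a (n+1) 1).foldl
        (fun (st : List (List String) × Int) i => (st.1 ++ [rowA n i st.2], st.2 - 1))
        (acc, n + 1 - a)).1
      = acc ++ (PySem.List.pyRange a (n+1) 1).map (fun i => rowA n i (n + 1 - i)) := by
  induction m with
  | zero =>
      intro a acc hm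
      have hab : ¬ a < n + 1 := by omega
      simp [PySem.List.pyRange, hab]
  | succ m ih =>
      intro a acc hm
      by_cases hab : a < n + 1
      · rw [PySem.List.pyRange_one_cons hab]
        simp only [List.foldl_cons, List.map_cons]
        have h1 : n + 1 - a - 1 = n + 1 - (a + 1) := by ring
        have := ih (a + 1) (acc ++ [rowA n a (n + 1 - a)]) (by omega)
        rw [h1, this, List.append_assoc, List.singleton_append]
      · simp [PySem.List.pyRange, hab]

-- the base row
lemma row0_eq (n : Int) (hn : -1 ≤ n) :
    (PySem.List.pyRange 0 (2*n+3) 1).foldl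
        (fun acc i => acc ++ [if i = PySem.Int.floordiv (2*n+3) 2 then "|" else " "]) []
      = List.replicate (n+1).toNat " " ++ ["|"] ++ List.replicate (n+1).toNat " " := by
  have hfd : PySem.Int.floordiv (2*n+3) 2 = n + 1 := by
    rw [PySem.Int.floordiv_eq_iff_of_pos (by omega)]; omega
  rw [hfd, PySem.List.foldl_append_singleton_eq_map, List.nil_append,
    pyRange_eq_map_range, List.map_map]
  have e := range_map_one_mark (n+1).toNat (2*n + 3 - 0).toNat (by omega)
    (fun (k : Nat) => if (0 + (k : Int)) = n + 1 then "|" else " ")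
    (by intro j hj; show (if (0 + (j : Int)) = n + 1 then "|" else " ") = " "
        split_ifs with c1 <;> first | rfl | (exfalso; omega))
    (by show (if (0 + (((n+1).toNat : Nat) : Int)) = n + 1 then "|" else " ") = "|"
        split_ifs with c1 <;> first | rfl | (exfalso; omega))
    (by intro j hj1 hj2; show (if (0 + (j : Int)) = n + 1 then "|" else " ") = " "
        split_ifs with c1 <;> first | rfl | (exfalso; omega))
  rw [show (2*n + 3 - 0).toNat - (n+1).toNat - 1 = (n+1).toNat by omega] at e
  exact e

-- ===== VERDICT (by name: the statement is the Claim_ definition above) =====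
theorem crear_discos_spec : Claim_equal_crear_discos := by
  intro n _ hpre
  show crear_discos n = crear_discos_alt n
  unfold crear_discos
  show ((PySem.List.pyRange 1 (n+1) 1).foldl
      (fun (st : List (List String) × Int) i => (st.1 ++ [rowA n i st.2], st.2 - 1))
      ([(PySem.List.pyRange 0 (2*n+3) 1).foldl
          (fun acc i => acc ++ [if i = PySem.Int.floordiv (2*n+3) 2 then "|" else " "]) []],
        n)).1 = crear_discos_alt n
  rw [row0_eq n hpre]
  have houter := outer_fold n (n+1).toNat 1
    [List.replicate (n+1).toNat " " ++ ["|"] ++ List.replicate (n+1).toNat " "] (by omega)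
  rw [show n + 1 - (1:Int) = n by ring] at houter
  rw [houter]
  unfold crear_discos_alt
  rw [List.singleton_append]
  refine congrArg _ (List.map_congr_left ?_)
  intro i hi
  rw [PySem.List.mem_pyRange_one] at hi
  exact rowA_eq n i hi.1 (by omega)
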